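-- pv_equiv track=rewrite | github.com/xpessoles/Informatique_PSI | 02_Piles/TD_02/programmes/TD_02_XP_SZ.py | somme3
-- ===== SOURCE A (Python) =====
-- def est_vide(pile):
--     """
--     Vérifie si la pile est vide.
--     Entrée :
--      * pile(list)
--     Sortie :
--      * retourne True si la pile est vide, False
--      sinon
--     """
--     for el in pile :
--         if el != None :
--             return False
--     return True
--
-- def depiler(pile):
--     """
--     Dépile l'élément du haut de la pile pile.
--     Entrée :
--      * pile(list)
--     Sortie :
--      * None si la pile est vide
--      * l'élément du haut de la pile sinon.
--      """
--     if est_vide(pile):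
--         return None
--     i=0
--     # On recherche le premier emplacement vide
--     while i < len(pile) and pile[i] != None :
--         i=i+1
--     el = pile[i-1]
--     pile[i-1]=None
--     return el
--
-- def somme3 (P) :
--     """ Renvoie la plus grande somme de trois éléments consécutifs
--     de la pile P.
--     Si cette pile a deux éléments ou moins, renvoie 0.
--     Précondition : P est une pile d'entiers naturels """
--     R = P.copy()
--     if est_vide(R) :
--         return 0
--     else :
--         x = depiler(R)
--         s = somme3(R)
--         for i in range(2) :
--             if est_vide(R) :
--                 return s
--             else :
--                 x += depiler(R)
--         return max(s,x)
-- ===== SOURCE B (Python) =====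
-- def somme3(P):
--     best = 0
--     for a, b, c in zip(P, P[1:], P[2:]):
--         best = max(best, a + b + c)
--     return best
-- ===== Notes on version B (the rewrite author's own statement) =====
-- stated objective: faster
-- what changed: Replaced the recursive stack simulation (copy, depiler scans, recursion per element) by a single zip-based sliding-window pass taking the max of triple sums.
import Mathlib
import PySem

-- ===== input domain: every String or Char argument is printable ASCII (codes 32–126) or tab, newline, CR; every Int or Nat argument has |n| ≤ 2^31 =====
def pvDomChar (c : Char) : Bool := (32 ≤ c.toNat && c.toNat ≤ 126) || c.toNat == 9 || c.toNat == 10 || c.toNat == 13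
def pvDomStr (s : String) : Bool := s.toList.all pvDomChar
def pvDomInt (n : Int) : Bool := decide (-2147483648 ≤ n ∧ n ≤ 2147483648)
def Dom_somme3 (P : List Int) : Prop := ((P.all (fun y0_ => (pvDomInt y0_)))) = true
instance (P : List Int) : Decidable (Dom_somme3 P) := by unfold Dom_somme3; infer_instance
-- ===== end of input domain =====

-- B replaces A's recursive stack simulation (copy + depiler scans per element) by one
-- zip-based sliding-window pass over the list; equivalence of return values is proved.

-- ===== PORT A =====
-- piles are lists of Option Int: `none` is Python's None sentinel for empty slots
def estVide : List (Option Int) → Bool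
  | [] => true
  | el :: rest => if el ≠ none then false else estVide rest

-- the `while i < len(pile) and pile[i] != None: i += 1` search
def firstNone : List (Option Int) → Nat
  | some _ :: rest => firstNone rest + 1
  | _ => 0

def depiler (pile : List (Option Int)) : Option Int × List (Option Int) :=
  if estVide pile then (none, pile)
  else
    let i := firstNone pile
    -- Python index i-1 (in range whenever pile is nonempty; wraps to len-1 when i = 0)
    let j := if i = 0 then pile.length - 1 else i - 1
    (pile.getD j none, pile.set j none)

-- somme3's recursion, with fuel as a totality guard (the Python recurses on a pile with
-- one fewer element each time, so fuel = len + 1 is never exhausted); `for i in range(2)`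
-- is unrolled literally.
def somme3Go : Nat → List (Option Int) → Int
  | 0, _ => 0
  | fuel + 1, r =>
    if estVide r then 0
    else
      let d1 := depiler r
      let s := somme3Go fuel d1.2
      if estVide d1.2 then s
      else
        let d2 := depiler d1.2
        if estVide d2.2 then s
        else
          let d3 := depiler d2.2
          max s (d1.1.getD 0 + d2.1.getD 0 + d3.1.getD 0)

def somme3 (P : List Int) : Int := somme3Go (P.length + 1) (P.map some)

-- ===== PORT B =====
-- for a, b, c in zip(P, P[1:], P[2:]): best = max(best, a + b + c)
def somme3_alt (P : List Int) : Int :=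
  (P.zip ((PySem.List.slice P (some 1) none).zip (PySem.List.slice P (some 2) none))).foldl
    (fun best t => max best (t.1 + t.2.1 + t.2.2)) 0

-- ===== PRECONDITION & SPEC =====
def Spec_somme3 (P : List Int) (out : Int) : Prop := out = somme3_alt P
instance (P : List Int) (out : Int) : Decidable (Spec_somme3 P out) := by unfold Spec_somme3; infer_instance

-- ===== CLAIM (what is proved, stated in full; the proofs are below) =====
def Claim_equal_somme3 : Prop := ∀ (P : List Int), Dom_somme3 P → Spec_somme3 P (somme3 P)

-- ===== LEMMAS AND PROOFS =====

-- window sums of three consecutive elements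
def W : List Int → List Int
  | a :: b :: c :: r => (a + b + c) :: W (b :: c :: r)
  | _ => []

-- A's recursion, abstracted to the reversed pile (top element first)
def gA : List Int → Int
  | x :: y :: z :: r => max (gA (y :: z :: r)) (x + y + z)
  | _ => 0

-- the singleton window that appending one element adds (sum of the last two plus x)
def E : List Int → Int → List Int
  | [a, b], x => [a + b + x]
  | _ :: b :: c :: r, x => E (b :: c :: r) x
  | _, _ => []

lemma foldl_max_shift : ∀ (m : List Int) (a x : Int),
    m.foldl max (max a x) = max x (m.foldl max a) := by
  intro m
  induction m with
  | nil => intro a x; simp only [List.foldl_nil]; omega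
  | cons c m ih =>
    intro a x
    have h : max (max a x) c = max (max a c) x := by omega
    simp only [List.foldl_cons, h, ih]

lemma foldl_max_reverse : ∀ (m : List Int) (a : Int),
    m.reverse.foldl max a = m.foldl max a := by
  intro m
  induction m with
  | nil => intro a; simp
  | cons x m ih =>
    intro a
    simp only [List.reverse_cons, List.foldl_append, List.foldl_cons, List.foldl_nil, ih,
      foldl_max_shift]
    omega

lemma estVide_rep (k : Nat) : estVide (List.replicate k none) = true := by
  induction k with
  | zero => simp [estVide]
  | succ k ih => simp [List.replicate_succ, estVide, ih]

lemma firstNone_rep (k : Nat) : firstNone (List.replicate k none) = 0 := by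
  cases k <;> simp [firstNone, List.replicate_succ]

lemma estVide_mid : ∀ (Q : List Int) (x : Int) (k : Nat),
    estVide (Q.map some ++ some x :: List.replicate k none) = false := by
  intro Q
  induction Q with
  | nil => intro x k; simp [estVide]
  | cons a t ih => intro x k; simp [estVide]

lemma firstNone_mid : ∀ (Q : List Int) (x : Int) (k : Nat),
    firstNone (Q.map some ++ some x :: List.replicate k none) = Q.length + 1 := by
  intro Q
  induction Q with
  | nil => intro x k; simp [firstNone, firstNone_rep]
  | cons a t ih => intro x k; simp [firstNone, ih]

lemma getD_mid : ∀ (Q : List Int) (x : Int) (k : Nat),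
    (Q.map some ++ some x :: List.replicate k none).getD Q.length none = some x := by
  intro Q
  induction Q with
  | nil => intro x k; simp
  | cons a t ih => intro x k; simp

lemma set_mid : ∀ (Q : List Int) (x : Int) (k : Nat),
    (Q.map some ++ some x :: List.replicate k none).set Q.length none
      = Q.map some ++ List.replicate (k + 1) none := by
  intro Q
  induction Q with
  | nil => intro x k; simp [List.replicate_succ]
  | cons a t ih => intro x k; simpa using ih x k

lemma depiler_spec (Q : List Int) (x : Int) (k : Nat) :
    depiler (Q.map some ++ some x :: List.replicate k none)
      = (some x, Q.map some ++ List.replicate (k + 1) none) := by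
  simp only [depiler, estVide_mid, Bool.false_eq_true, if_false, firstNone_mid]
  simp only [Nat.add_sub_cancel, Nat.succ_ne_zero, if_false]
  rw [getD_mid, set_mid]

lemma go_spec : ∀ (fuel : Nat) (Q : List Int) (k : Nat), Q.length < fuel →
    somme3Go fuel (Q.map some ++ List.replicate k none) = gA Q.reverse := by
  intro fuel
  induction fuel with
  | zero => intro Q k h; omega
  | succ fuel ih =>
    intro Q k h
    rcases Q.eq_nil_or_concat with rfl | ⟨Q', x, rfl⟩
    · simp [somme3Go, estVide_rep, gA]
    · simp only [List.concat_eq_append] at h ⊢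
      have hrw : (Q' ++ [x]).map some ++ List.replicate k none
          = Q'.map some ++ some x :: List.replicate k none := by simp
      rw [hrw]
      have hlen : Q'.length < fuel := by
        simp only [List.length_append, List.length_cons, List.length_nil] at h; omega
      simp only [somme3Go, estVide_mid, Bool.false_eq_true, if_false, depiler_spec]
      rw [ih Q' (k + 1) hlen]
      rcases Q'.eq_nil_or_concat with rfl | ⟨Q'', y, rfl⟩
      · simp [estVide_rep, gA]
      · simp only [List.concat_eq_append]
        have hrw2 : (Q'' ++ [y]).map some ++ List.replicate (k + 1) none
            = Q''.map some ++ some y :: List.replicate (k + 1) none := by simp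
        rw [hrw2]
        simp only [estVide_mid, Bool.false_eq_true, if_false, depiler_spec]
        rcases Q''.eq_nil_or_concat with rfl | ⟨Q''', z, rfl⟩
        · simp [estVide_rep, gA]
        · simp only [List.concat_eq_append]
          have hrw3 : (Q''' ++ [z]).map some ++ List.replicate (k + 1 + 1) none
              = Q'''.map some ++ some z :: List.replicate (k + 1 + 1) none := by simp
          rw [hrw3]
          simp only [estVide_mid, Bool.false_eq_true, if_false, depiler_spec]
          simp [gA]

lemma gA_eq_foldl : ∀ (l : List Int), gA l = (W l).foldl max 0 := by
  intro l
  induction l using gA.induct with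
  | case1 x y z r ih =>
    simp only [gA, W, List.foldl_cons, ih, foldl_max_shift]
    omega
  | case2 l h => cases l with
    | nil => simp [gA, W]
    | cons a t => cases t with
      | nil => simp [gA, W]
      | cons b u => cases u with
        | nil => simp [gA, W]
        | cons c v => exact absurd rfl (h a b c v)

lemma E_cons (a b c : Int) (r : List Int) (x : Int) :
    E (a :: b :: c :: r) x = E (b :: c :: r) x := by
  simp [E]

lemma E_snoc2 : ∀ (s : List Int) (u v x : Int), E (s ++ [u, v]) x = [u + v + x] := by
  intro s
  induction s with
  | nil => intro u v x; simp [E]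
  | cons a s' ih =>
    intro u v x
    cases s' with
    | nil => simp [E]
    | cons d s'' =>
      have h : s'' ++ [u, v] ≠ [] := by simp
      obtain ⟨e, t', he⟩ := List.exists_cons_of_ne_nil h
      have : (a :: (d :: s'') ++ [u, v]) = a :: d :: e :: t' := by simp [he]
      rw [this, E_cons]
      have h2 : (d :: s'') ++ [u, v] = d :: e :: t' := by simp [he]
      rw [← h2, ih]

lemma W_snoc : ∀ (s : List Int) (x : Int), W (s ++ [x]) = W s ++ E s x := by
  intro s
  induction s with
  | nil => intro x; simp [W, E]
  | cons a t ih =>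
    intro x
    cases t with
    | nil => simp [W, E]
    | cons b u => cases u with
      | nil => simp [W, E]
      | cons c r =>
        have : (a :: b :: c :: r) ++ [x] = a :: b :: c :: (r ++ [x]) := by simp
        rw [this]
        show (a + b + c) :: W (b :: c :: (r ++ [x])) = _
        have h2 : b :: c :: (r ++ [x]) = (b :: c :: r) ++ [x] := by simp
        rw [h2, ih, E_cons]
        simp [W]

lemma W_rev : ∀ (l : List Int), W l.reverse = (W l).reverse := by
  intro l
  induction l with
  | nil => simp [W]
  | cons a t ih =>
    cases t with
    | nil => simp [W]
    | cons b u => cases u with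
      | nil => simp [W]
      | cons c r =>
        have h1 : (a :: b :: c :: r).reverse = (b :: c :: r).reverse ++ [a] := by simp
        rw [h1, W_snoc, ih]
        have h3 : (b :: c :: r).reverse = r.reverse ++ [c, b] := by simp
        rw [h3, E_snoc2]
        have h5 : W (a :: b :: c :: r) = (a + b + c) :: W (b :: c :: r) := rfl
        rw [h5]
        simp only [List.reverse_cons, List.append_cancel_left_eq, List.cons.injEq, and_true]
        omega

lemma zipW : ∀ (P : List Int),
    (P.zip ((P.drop 1).zip (P.drop 2))).map (fun t => t.1 + t.2.1 + t.2.2) = W P := by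
  intro P
  induction P using W.induct with
  | case1 a b c r ih =>
    simp only [List.drop] at *
    simp [W, List.zip_cons_cons, ← ih]
  | case2 l h => cases l with
    | nil => simp [W]
    | cons a t => cases t with
      | nil => simp [W]
      | cons b u => cases u with
        | nil => simp [W]
        | cons c v => exact absurd rfl (h a b c v)

lemma alt_eq_foldl (P : List Int) : somme3_alt P = (W P).foldl max 0 := by
  unfold somme3_alt
  rw [PySem.List.slice_from_one,
    show (2 : Int) = ((2 : Nat) : Int) by norm_num, PySem.List.slice_from_natCast]
  have htail : P.tail = P.drop 1 := by cases P <;> simp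
  rw [htail, ← zipW P, List.foldl_map]

-- ===== VERDICT (by name: the statement is the Claim_ definition above) =====
theorem somme3_spec : Claim_equal_somme3 := by
  intro P _
  unfold Spec_somme3
  unfold somme3
  have h : P.map some = P.map some ++ List.replicate 0 none := by simp
  rw [h, go_spec (P.length + 1) P 0 (by omega), gA_eq_foldl, W_rev, foldl_max_reverse,
    alt_eq_foldl]
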